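-- pv_equiv track=rewrite | github.com/omer2345/Multi-Horizon-IMU-predction | utils/visualization.py | _find_seg_id
-- ===== SOURCE A (Python) =====
-- def _find_seg_id(rec_idx: int, sample_idx: int, seg_index) -> int:
--     """Binary-search the segment containing sample_idx for a given recording; -1 if none."""
--     lst = seg_index.get(rec_idx, [])
--     lo, hi = 0, len(lst) - 1
--     while lo <= hi:
--         mid = (lo + hi) // 2
--         s, e, sid = lst[mid]
--         if sample_idx < s:
--             hi = mid - 1
--         elif sample_idx >= e:
--             lo = mid + 1
--         else:
--             return sid
--     return -1
-- ===== SOURCE B (Python) =====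
-- def _find_seg_id(rec_idx: int, sample_idx: int, seg_index) -> int:
--     """Search by repeatedly slicing the candidate list in half around its middle
--     element; -1 when the list is exhausted."""
--     lst = seg_index.get(rec_idx, [])
--     while lst:
--         mid = (len(lst) - 1) // 2
--         s, e, sid = lst[mid]
--         if s <= sample_idx < e:
--             return sid
--         lst = lst[:mid] if sample_idx < s else lst[mid + 1:]
--     return -1
-- ===== Notes on version B (the rewrite author's own statement) =====
-- stated objective: alternative
-- what changed: The index-based while-loop binary search (lo/hi bookkeeping, lst[mid] indexing) is replaced by a loop over shrinking list slices: the whole candidate list is cut to lst[:mid] or lst[mid+1:] around its middle element until it is empty, so no index arithmetic or bounds remain.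
import Mathlib
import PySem

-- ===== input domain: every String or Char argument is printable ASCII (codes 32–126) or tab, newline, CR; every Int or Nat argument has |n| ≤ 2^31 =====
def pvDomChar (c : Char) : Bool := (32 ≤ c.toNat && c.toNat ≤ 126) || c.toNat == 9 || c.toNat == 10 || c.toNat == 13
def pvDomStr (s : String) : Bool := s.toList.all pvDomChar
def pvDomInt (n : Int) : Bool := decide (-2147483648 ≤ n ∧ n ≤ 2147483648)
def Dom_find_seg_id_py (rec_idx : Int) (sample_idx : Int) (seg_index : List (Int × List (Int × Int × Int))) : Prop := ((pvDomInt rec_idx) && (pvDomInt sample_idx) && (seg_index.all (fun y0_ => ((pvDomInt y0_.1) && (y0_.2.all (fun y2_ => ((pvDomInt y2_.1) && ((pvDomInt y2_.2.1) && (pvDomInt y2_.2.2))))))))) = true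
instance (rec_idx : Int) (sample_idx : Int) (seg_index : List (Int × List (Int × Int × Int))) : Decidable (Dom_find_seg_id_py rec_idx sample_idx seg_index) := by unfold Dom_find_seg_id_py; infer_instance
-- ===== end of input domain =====

-- B replaces A's index-based (lo/hi) binary search by a loop over shrinking list
-- slices cut around the middle element; same result, alternative decomposition.

-- ===== PORT A =====
-- the while-loop of A, as structural recursion on the shrinking interval (lo, hi);
-- lst[mid] via pyGet? (the none branch is unreachable since lo ≤ mid ≤ hi stays in range)
def pvLoopA (sample_idx : Int) (lst : List (Int × Int × Int)) (lo hi : Int) : Int :=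
  if h : lo ≤ hi then
    let mid := PySem.Int.floordiv (lo + hi) 2
    match PySem.List.pyGet? lst mid with
    | none => -1
    | some (s, e, sid) =>
      if sample_idx < s then pvLoopA sample_idx lst lo (mid - 1)
      else if sample_idx ≥ e then pvLoopA sample_idx lst (mid + 1) hi
      else sid
  else -1
termination_by (hi + 1 - lo).toNat
decreasing_by
  · have := PySem.Int.floordiv_two_mid_bounds h; omega
  · have := PySem.Int.floordiv_two_mid_bounds h; omega

def find_seg_id_py (rec_idx : Int) (sample_idx : Int) (seg_index : List (Int × List (Int × Int × Int))) : Int :=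
  let lst := (PySem.Dict.mk seg_index).getD rec_idx []
  pvLoopA sample_idx lst 0 (lst.length - 1)

-- ===== PORT B =====
-- the `while lst:` loop of Source B: each iteration replaces lst by the slice
-- lst[:mid] or lst[mid+1:]; recursion is on the shrinking list itself
def pvSliceLoop (sample_idx : Int) (lst : List (Int × Int × Int)) : Int :=
  if hne : lst ≠ [] then
    let mid : Int := PySem.Int.floordiv ((lst.length : Int) - 1) 2
    match PySem.List.pyGet? lst mid with
    | none => -1
    | some (s, e, sid) =>
      if s ≤ sample_idx ∧ sample_idx < e then sid
      else if sample_idx < s then pvSliceLoop sample_idx (PySem.List.slice lst none (some mid))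
      else pvSliceLoop sample_idx (PySem.List.slice lst (some (mid + 1)) none)
  else -1
termination_by lst.length
decreasing_by
  · have hlen : 1 ≤ (lst.length : Int) := by
      have : lst.length ≠ 0 := by simpa [List.length_eq_zero_iff] using hne
      omega
    have hmid := PySem.Int.floordiv_two_mid_bounds (lo := 0) (hi := (lst.length : Int) - 1) (by omega)
    simp only [zero_add] at hmid
    have h0 : (0:Int) ≤ PySem.Int.floordiv ((lst.length : Int) - 1) 2 := hmid.1
    rw [PySem.List.slice_to lst h0]
    have : (PySem.Int.floordiv ((lst.length : Int) - 1) 2).toNat < lst.length := by omega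
    simp
    omega
  · have hlen : 1 ≤ (lst.length : Int) := by
      have : lst.length ≠ 0 := by simpa [List.length_eq_zero_iff] using hne
      omega
    have hmid := PySem.Int.floordiv_two_mid_bounds (lo := 0) (hi := (lst.length : Int) - 1) (by omega)
    simp only [zero_add] at hmid
    have h0 : (0:Int) ≤ PySem.Int.floordiv ((lst.length : Int) - 1) 2 + 1 := by omega
    rw [PySem.List.slice_from lst h0]
    simp
    omega

def find_seg_id_py_alt (rec_idx : Int) (sample_idx : Int) (seg_index : List (Int × List (Int × Int × Int))) : Int :=
  let lst := (PySem.Dict.mk seg_index).getD rec_idx []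
  pvSliceLoop sample_idx lst

-- ===== PRECONDITION & SPEC =====
def Spec_find_seg_id_py (rec_idx : Int) (sample_idx : Int) (seg_index : List (Int × List (Int × Int × Int))) (out : Int) : Prop := out = find_seg_id_py_alt rec_idx sample_idx seg_index
instance (rec_idx : Int) (sample_idx : Int) (seg_index : List (Int × List (Int × Int × Int))) (out : Int) : Decidable (Spec_find_seg_id_py rec_idx sample_idx seg_index out) := by unfold Spec_find_seg_id_py; infer_instance

-- ===== CLAIM (what is proved, stated in full; the proofs are below) =====
def Claim_equal_find_seg_id_py : Prop := ∀ (rec_idx : Int) (sample_idx : Int) (seg_index : List (Int × List (Int × Int × Int))), Dom_find_seg_id_py rec_idx sample_idx seg_index → Spec_find_seg_id_py rec_idx sample_idx seg_index (find_seg_id_py rec_idx sample_idx seg_index)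

-- ===== LEMMAS AND PROOFS =====

-- A's interval [lo, hi] of lst is B's slice (lst.drop lo.toNat).take n, n = hi+1-lo;
-- the two searches visit the same elements in the same order
lemma pvLoop_eq_slice (x : Int) (lst : List (Int × Int × Int)) :
    ∀ (n : Nat) (lo hi : Int), 0 ≤ lo → hi < lst.length → (hi + 1 - lo).toNat = n →
      pvLoopA x lst lo hi = pvSliceLoop x ((lst.drop lo.toNat).take n) := by
  intro n
  induction n using Nat.strong_induction_on with
  | _ n ih =>
    intro lo hi hlo hhi hn
    by_cases h : lo ≤ hi
    · -- non-empty interval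
      have hn1 : 1 ≤ n := by omega
      have hcast : (n : Int) = hi + 1 - lo := by omega
      have hsublen : ((lst.drop lo.toNat).take n).length = n := by
        simp only [List.length_take, List.length_drop]
        omega
      have hsubne : (lst.drop lo.toNat).take n ≠ [] := by
        intro hempty
        rw [hempty] at hsublen
        simp at hsublen
        omega
      have hmA : PySem.Int.floordiv (lo + hi) 2 = (lo + hi) / 2 :=
        PySem.Int.floordiv_eq_ediv_of_pos (by norm_num)
      have hmB : PySem.Int.floordiv ((((lst.drop lo.toNat).take n).length : Int) - 1) 2
          = ((n : Int) - 1) / 2 := by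
        rw [hsublen]
        exact PySem.Int.floordiv_eq_ediv_of_pos (by norm_num)
      set mB : Int := ((n : Int) - 1) / 2 with hmBdef
      have hmB0 : 0 ≤ mB := by omega
      have hmBlt : mB < (n : Int) := by omega
      have hrel : PySem.Int.floordiv (lo + hi) 2 = lo + mB := by omega
      -- the two searches inspect the same element
      have hgetA : PySem.List.pyGet? lst (PySem.Int.floordiv (lo + hi) 2)
          = lst[(lo.toNat + mB.toNat)]? := by
        have h1 : PySem.Int.floordiv (lo + hi) 2 = ((lo.toNat + mB.toNat : Nat) : Int) := by
          omega
        rw [h1, PySem.List.pyGet?_natCast]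
      have hgetB : PySem.List.pyGet? ((lst.drop lo.toNat).take n)
          (PySem.Int.floordiv ((((lst.drop lo.toNat).take n).length : Int) - 1) 2)
          = lst[(lo.toNat + mB.toNat)]? := by
        rw [hmB]
        have h1 : mB = ((mB.toNat : Nat) : Int) := by omega
        rw [h1, PySem.List.pyGet?_natCast, List.getElem?_take,
            if_pos (by omega : mB.toNat < n), List.getElem?_drop]
        simp only [Int.toNat_natCast]
      unfold pvLoopA pvSliceLoop
      rw [dif_pos h, dif_pos hsubne]
      simp only [hgetA, hgetB]
      cases hg : lst[(lo.toNat + mB.toNat)]? with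
      | none => rfl
      | some t =>
        obtain ⟨s, e, sid⟩ := t
        dsimp only
        by_cases h1 : x < s
        · rw [if_pos h1, if_neg (by omega : ¬ (s ≤ x ∧ x < e)), if_pos h1]
          -- left halves coincide
          have hslice : PySem.List.slice ((lst.drop lo.toNat).take n) none
              (some (PySem.Int.floordiv ((((lst.drop lo.toNat).take n).length : Int) - 1) 2))
              = (lst.drop lo.toNat).take mB.toNat := by
            rw [hmB, PySem.List.slice_to _ hmB0, List.take_take,
                min_eq_left (by omega : mB.toNat ≤ n)]
          rw [hslice, hrel]
          exact ih mB.toNat (by omega) lo (lo + mB - 1) hlo (by omega) (by omega)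
        · by_cases h2 : x ≥ e
          · rw [if_neg h1, if_pos h2, if_neg (by omega : ¬ (s ≤ x ∧ x < e)), if_neg h1]
            -- right halves coincide
            have hslice : PySem.List.slice ((lst.drop lo.toNat).take n)
                (some (PySem.Int.floordiv ((((lst.drop lo.toNat).take n).length : Int) - 1) 2 + 1))
                none = (lst.drop (lo + mB + 1).toNat).take (n - (mB.toNat + 1)) := by
              rw [hmB, PySem.List.slice_from _ (by omega : (0:Int) ≤ mB + 1),
                  List.drop_take, List.drop_drop,
                  (by omega : (mB + 1).toNat = mB.toNat + 1),
                  (by omega : lo.toNat + (mB.toNat + 1) = (lo + mB + 1).toNat)]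
            rw [hslice, hrel]
            exact ih (n - (mB.toNat + 1)) (by omega) (lo + mB + 1) hi (by omega) hhi (by omega)
          · rw [if_neg h1, if_neg h2, if_pos (by omega : s ≤ x ∧ x < e)]
    · -- empty interval: n = 0, the slice is [] and both sides return -1
      have hn0 : n = 0 := by omega
      subst hn0
      unfold pvLoopA pvSliceLoop
      rw [dif_neg h]
      simp

-- ===== VERDICT (by name: the statement is the Claim_ definition above) =====
theorem find_seg_id_py_spec : Claim_equal_find_seg_id_py := by
  intro rec_idx sample_idx seg_index _
  unfold Spec_find_seg_id_py find_seg_id_py find_seg_id_py_alt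
  set lst := (PySem.Dict.mk seg_index).getD rec_idx [] with hlst
  have h := pvLoop_eq_slice sample_idx lst lst.length 0 ((lst.length : Int) - 1)
    le_rfl (by omega) (by omega)
  simpa using h
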